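-- pv_equiv track=rewrite | github.com/hyukkyukang/raquel_anon | src/utils/table_data.py | prioritize_columns
-- ===== SOURCE A (Python) =====
-- from typing import Any, Dict, List, Optional, Tuple
--
-- def prioritize_columns(
--     columns: List[Tuple[str, str]],
--     table_name: str,
--     max_columns: int = 15,
--     non_null_counts: Optional[Dict[str, int]] = None,
-- ) -> Tuple[List[Tuple[str, str]], List[Tuple[str, str]], List[Tuple[str, str]]]:
--     """Prioritize columns by importance for LLM context.
--
--     Returns columns grouped into: primary keys, foreign keys, and data columns.
--     Data columns are prioritized by:
--     1. Name/title columns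
--     2. Date columns
--     3. Common descriptive columns
--     4. Remaining columns by non-null count (if provided) or alphabetically
--
--     Args:
--         columns: List of (column_name, column_type) tuples
--         table_name: Name of the table (used to identify primary key)
--         max_columns: Maximum total columns to return
--         non_null_counts: Optional dict of column -> non-null count for ranking
--
--     Returns:
--         Tuple of (primary_keys, foreign_keys, data_columns)
--     """
--     primary_keys: List[Tuple[str, str]] = []
--     foreign_keys: List[Tuple[str, str]] = []
--     data_columns: List[Tuple[str, str]] = []
--
--     # Priority patterns for data columns
--     name_patterns = {"name", "title", "label"}
--     date_patterns = {"date", "year"}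
--     common_patterns = {"description", "type", "status", "category"}
--
--     # Expected primary key name
--     expected_pk = f"{table_name}_id"
--
--     for col_name, col_type in columns:
--         col_lower = col_name.lower()
--
--         # Check if primary key (first column ending with _id matching table name, or 'id')
--         if col_lower == expected_pk or (col_lower == "id" and not primary_keys):
--             primary_keys.append((col_name, col_type))
--         # Check if foreign key (ends with _id but not the primary key)
--         elif col_lower.endswith("_id") and col_lower != expected_pk:
--             foreign_keys.append((col_name, col_type))
--         else:
--             data_columns.append((col_name, col_type))
--
--     # Sort data columns by priority
--     def data_column_priority(col: Tuple[str, str]) -> Tuple[int, int, str]: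
--         col_name = col[0].lower()
--
--         # Priority 1: Name/title columns
--         if col_name in name_patterns or any(p in col_name for p in name_patterns):
--             priority = 0
--         # Priority 2: Date columns
--         elif any(p in col_name for p in date_patterns):
--             priority = 1
--         # Priority 3: Common descriptive columns
--         elif col_name in common_patterns:
--             priority = 2
--         # Priority 4: Other columns - sort by non-null count (descending)
--         else:
--             priority = 3
--
--         # Secondary sort: by non-null count (descending, so negate)
--         non_null = 0
--         if non_null_counts and col[0] in non_null_counts:
--             non_null = -non_null_counts[col[0]]  # Negative for descending
--
--         return (priority, non_null, col_name)
--
--     data_columns.sort(key=data_column_priority)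
--
--     # Calculate how many data columns we can include
--     pk_fk_count = len(primary_keys) + len(foreign_keys)
--     max_data_columns = max(0, max_columns - pk_fk_count)
--     data_columns = data_columns[:max_data_columns]
--
--     return primary_keys, foreign_keys, data_columns
-- ===== SOURCE B (Python) =====
-- from typing import Dict, List, Optional, Tuple
--
--
-- def prioritize_columns(
--     columns: List[Tuple[str, str]],
--     table_name: str,
--     max_columns: int = 15,
--     non_null_counts: Optional[Dict[str, int]] = None,
-- ) -> Tuple[List[Tuple[str, str]], List[Tuple[str, str]], List[Tuple[str, str]]]:
--     """Single classification pass into seven buckets (pk, fk, four data-priority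
--     tiers), then each tier is sorted independently and the tiers concatenated."""
--     expected_pk = f"{table_name}_id"
--     name_patterns = ("name", "title", "label")
--     date_patterns = ("date", "year")
--     common_patterns = ("description", "type", "status", "category")
--
--     primary_keys: List[Tuple[str, str]] = []
--     foreign_keys: List[Tuple[str, str]] = []
--     tiers: Tuple[List[Tuple[str, str]], ...] = ([], [], [], [])
--
--     for col in columns:
--         low = col[0].lower()
--         if low == expected_pk or (low == "id" and not primary_keys):
--             primary_keys.append(col)
--         elif low.endswith("_id"):
--             foreign_keys.append(col)
--         elif any(p in low for p in name_patterns):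
--             tiers[0].append(col)
--         elif any(p in low for p in date_patterns):
--             tiers[1].append(col)
--         elif low in common_patterns:
--             tiers[2].append(col)
--         else:
--             tiers[3].append(col)
--
--     def subkey(col: Tuple[str, str]) -> Tuple[int, str]:
--         if non_null_counts and col[0] in non_null_counts:
--             return (-non_null_counts[col[0]], col[0].lower())
--         return (0, col[0].lower())
--
--     data: List[Tuple[str, str]] = []
--     for tier in tiers:
--         data.extend(sorted(tier, key=subkey))
--
--     keep = max(0, max_columns - len(primary_keys) - len(foreign_keys))
--     return primary_keys, foreign_keys, data[:keep]
-- ===== Notes on version B (the rewrite author's own statement) =====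
-- stated objective: alternative
-- what changed: A partitions columns into three lists and then runs one stable sort of the whole data list under a 3-component (priority, -non_null, lowered name) key; B instead classifies every column in a single pass into seven buckets (pk, fk, four priority tiers), sorts each tier independently under the 2-component (-non_null, lowered name) key, and concatenates the tiers in priority order.
import Mathlib
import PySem

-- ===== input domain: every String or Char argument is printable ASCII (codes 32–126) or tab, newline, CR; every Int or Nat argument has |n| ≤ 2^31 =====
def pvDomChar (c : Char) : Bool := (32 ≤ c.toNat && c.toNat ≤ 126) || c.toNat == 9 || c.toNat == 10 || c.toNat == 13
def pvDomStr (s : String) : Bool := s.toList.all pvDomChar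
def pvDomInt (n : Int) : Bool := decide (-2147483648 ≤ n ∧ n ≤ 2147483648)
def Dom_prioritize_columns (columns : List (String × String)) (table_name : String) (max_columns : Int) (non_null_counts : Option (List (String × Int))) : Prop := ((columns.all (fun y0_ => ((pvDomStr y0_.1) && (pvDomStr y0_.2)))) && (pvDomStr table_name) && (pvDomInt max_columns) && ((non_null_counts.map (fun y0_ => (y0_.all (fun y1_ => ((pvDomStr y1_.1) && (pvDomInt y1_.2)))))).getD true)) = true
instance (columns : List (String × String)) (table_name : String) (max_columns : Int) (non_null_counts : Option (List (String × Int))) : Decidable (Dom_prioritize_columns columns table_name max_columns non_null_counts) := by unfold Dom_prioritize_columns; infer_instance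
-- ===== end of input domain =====

-- B replaces A's single 3-key sort of one data list by a single classification pass into
-- seven buckets (pk, fk, four priority tiers), sorting each tier independently (alternative decomposition).


-- ===== PORT A =====
def pvNamePatterns : List String := ["name", "title", "label"]
def pvDatePatterns : List String := ["date", "year"]
def pvCommonPatterns : List String := ["description", "type", "status", "category"]

-- the partition loop of A: state (primary_keys, foreign_keys, data_columns)
def pvAStep (expected_pk : String)
    (st : List (String × String) × List (String × String) × List (String × String))
    (col : String × String) :
    List (String × String) × List (String × String) × List (String × String) :=
  let col_lower := PySem.Str.lower col.1
  if col_lower == expected_pk || (col_lower == "id" && st.1.isEmpty) then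
    (st.1 ++ [col], st.2.1, st.2.2)
  else if PySem.Str.endswith col_lower "_id" && col_lower != expected_pk then
    (st.1, st.2.1 ++ [col], st.2.2)
  else
    (st.1, st.2.1, st.2.2 ++ [col])

-- data_column_priority: Python's (priority, non_null, col_name) tuple key
def pvAKey (non_null_counts : Option (List (String × Int))) (col : String × String) :
    Int × Int × List Char :=
  let col_name := PySem.Str.lower col.1
  let priority : Int :=
    if pvNamePatterns.contains col_name || pvNamePatterns.any (fun p => PySem.Str.isIn p col_name) then 0
    else if pvDatePatterns.any (fun p => PySem.Str.isIn p col_name) then 1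
    else if pvCommonPatterns.contains col_name then 2
    else 3
  let non_null : Int :=
    match non_null_counts with
    | none => 0
    | some d => if !d.isEmpty && (PySem.Dict.get? (PySem.Dict.mk d) col.1).isSome then -(PySem.Dict.getD (PySem.Dict.mk d) col.1 0) else 0
  (priority, non_null, col_name.toList)

-- Python's lexicographic comparison of the 3-tuple keys (PySem.List.sorted covers 1- and
-- 2-component keys; the 3-component tuple order is written out here, exact for Python tuples)
def pvKeyLt (a b : Int × Int × List Char) : Bool :=
  decide (a.1 < b.1) || (a.1 == b.1 && (decide (a.2.1 < b.2.1) || (a.2.1 == b.2.1 && decide (a.2.2 < b.2.2))))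

def prioritize_columns (columns : List (String × String)) (table_name : String) (max_columns : Int) (non_null_counts : Option (List (String × Int))) : (List (String × String)) × (List (String × String)) × (List (String × String)) :=
  let expected_pk := table_name ++ "_id"
  let st := columns.foldl (pvAStep expected_pk) ([], [], [])
  -- data_columns.sort(key=data_column_priority): the stable insertion-sort loop of PySem.List.sorted
  let data_sorted := st.2.2.foldl
    (fun acc x => PySem.List.insertBy (fun a b => pvKeyLt (pvAKey non_null_counts a) (pvAKey non_null_counts b)) x acc) []
  let pk_fk_count : Int := PySem.List.len st.1 + PySem.List.len st.2.1
  let max_data_columns := max 0 (max_columns - pk_fk_count)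
  (st.1, st.2.1, PySem.List.slice data_sorted none (some max_data_columns))

-- ===== PORT B =====
def pvBNamePatterns : List String := ["name", "title", "label"]
def pvBDatePatterns : List String := ["date", "year"]
def pvBCommonPatterns : List String := ["description", "type", "status", "category"]
-- the seven-bucket classification pass of B: state (pk, fk, tier0, tier1, tier2, tier3)
def pvBStep (expected_pk : String)
    (st : List (String × String) × List (String × String) × List (String × String) ×
          List (String × String) × List (String × String) × List (String × String))
    (col : String × String) :
    List (String × String) × List (String × String) × List (String × String) ×
    List (String × String) × List (String × String) × List (String × String) :=
  let low := PySem.Str.lower col.1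
  if low == expected_pk || (low == "id" && st.1.isEmpty) then
    (st.1 ++ [col], st.2.1, st.2.2.1, st.2.2.2.1, st.2.2.2.2.1, st.2.2.2.2.2)
  else if PySem.Str.endswith low "_id" then
    (st.1, st.2.1 ++ [col], st.2.2.1, st.2.2.2.1, st.2.2.2.2.1, st.2.2.2.2.2)
  else if pvBNamePatterns.any (fun p => PySem.Str.isIn p low) then
    (st.1, st.2.1, st.2.2.1 ++ [col], st.2.2.2.1, st.2.2.2.2.1, st.2.2.2.2.2)
  else if pvBDatePatterns.any (fun p => PySem.Str.isIn p low) then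
    (st.1, st.2.1, st.2.2.1, st.2.2.2.1 ++ [col], st.2.2.2.2.1, st.2.2.2.2.2)
  else if pvBCommonPatterns.contains low then
    (st.1, st.2.1, st.2.2.1, st.2.2.2.1, st.2.2.2.2.1 ++ [col], st.2.2.2.2.2)
  else
    (st.1, st.2.1, st.2.2.1, st.2.2.2.1, st.2.2.2.2.1, st.2.2.2.2.2 ++ [col])

-- subkey: (-non_null_count | 0, lowered name)
def pvBNn (non_null_counts : Option (List (String × Int))) (col : String × String) : Int :=
  match non_null_counts with
  | none => 0
  | some d => if !d.isEmpty && (PySem.Dict.get? (PySem.Dict.mk d) col.1).isSome then -(PySem.Dict.getD (PySem.Dict.mk d) col.1 0) else 0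

def pvBLow (col : String × String) : List Char := (PySem.Str.lower col.1).toList

def prioritize_columns_alt (columns : List (String × String)) (table_name : String) (max_columns : Int) (non_null_counts : Option (List (String × Int))) : (List (String × String)) × (List (String × String)) × (List (String × String)) :=
  let expected_pk := table_name ++ "_id"
  let st := columns.foldl (pvBStep expected_pk) ([], [], [], [], [], [])
  let data :=
    PySem.List.sorted2 st.2.2.1 (pvBNn non_null_counts) pvBLow ++
    PySem.List.sorted2 st.2.2.2.1 (pvBNn non_null_counts) pvBLow ++
    PySem.List.sorted2 st.2.2.2.2.1 (pvBNn non_null_counts) pvBLow ++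
    PySem.List.sorted2 st.2.2.2.2.2 (pvBNn non_null_counts) pvBLow
  let keep := max 0 (max_columns - (PySem.List.len st.1 + PySem.List.len st.2.1))
  (st.1, st.2.1, PySem.List.slice data none (some keep))

-- ===== PRECONDITION & SPEC =====
def Spec_prioritize_columns (columns : List (String × String)) (table_name : String) (max_columns : Int) (non_null_counts : Option (List (String × Int))) (out : (List (String × String)) × (List (String × String)) × (List (String × String))) : Prop := out = prioritize_columns_alt columns table_name max_columns non_null_counts
instance (columns : List (String × String)) (table_name : String) (max_columns : Int) (non_null_counts : Option (List (String × Int))) (out : (List (String × String)) × (List (String × String)) × (List (String × String))) : Decidable (Spec_prioritize_columns columns table_name max_columns non_null_counts out) := by unfold Spec_prioritize_columns; infer_instance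

-- ===== CLAIM (what is proved, stated in full; the proofs are below) =====
def Claim_equal_prioritize_columns : Prop := ∀ (columns : List (String × String)) (table_name : String) (max_columns : Int) (non_null_counts : Option (List (String × Int))), Dom_prioritize_columns columns table_name max_columns non_null_counts → Spec_prioritize_columns columns table_name max_columns non_null_counts (prioritize_columns columns table_name max_columns non_null_counts)


-- ===== LEMMAS AND PROOFS =====

-- priority-class tests (on the lowered column name) and the four tier predicates
def pvD0 (c : String × String) : Bool := pvNamePatterns.any (fun p => PySem.Str.isIn p (PySem.Str.lower c.1))
def pvD1 (c : String × String) : Bool := pvDatePatterns.any (fun p => PySem.Str.isIn p (PySem.Str.lower c.1))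
def pvD2 (c : String × String) : Bool := pvCommonPatterns.contains (PySem.Str.lower c.1)
def pvPri (c : String × String) : Int := if pvD0 c then 0 else if pvD1 c then 1 else if pvD2 c then 2 else 3
def pvQ0 (c : String × String) : Bool := pvD0 c
def pvQ1 (c : String × String) : Bool := !pvD0 c && pvD1 c
def pvQ2 (c : String × String) : Bool := !pvD0 c && !pvD1 c && pvD2 c
def pvQ3 (c : String × String) : Bool := !pvD0 c && !pvD1 c && !pvD2 c

-- A's redundant exact-membership clause collapses into the substring test
theorem pvContains_any (l : List String) (s : String) (h : l.contains s = true) :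
    l.any (fun p => PySem.Str.isIn p s) = true := by
  simp only [List.any_eq_true]
  refine ⟨s, by simpa using h, ?_⟩
  rw [PySem.Str.isIn_iff_infix]

theorem pvAKey_eq (nnc : Option (List (String × Int))) (c : String × String) :
    pvAKey nnc c = (pvPri c, pvBNn nnc c, pvBLow c) := by
  have hcollapse : (pvNamePatterns.contains (PySem.Str.lower c.1)
      || pvNamePatterns.any (fun p => PySem.Str.isIn p (PySem.Str.lower c.1)))
      = pvNamePatterns.any (fun p => PySem.Str.isIn p (PySem.Str.lower c.1)) := by
    by_cases h : pvNamePatterns.contains (PySem.Str.lower c.1) = true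
    · rw [h, pvContains_any _ _ h]; rfl
    · simp only [Bool.not_eq_true] at h
      rw [h, Bool.false_or]
  simp only [pvAKey, pvPri, pvBNn, pvBLow, pvD0, pvD1, pvD2, hcollapse]
  rfl

-- insertBy: the two structural equations, and how it passes over / stops before a block
theorem pvInsertBy_nil {α : Type} (before : α → α → Bool) (x : α) :
    PySem.List.insertBy before x [] = [x] := by simp [PySem.List.insertBy]

theorem pvInsertBy_cons {α : Type} (before : α → α → Bool) (x y : α) (ys : List α) :
    PySem.List.insertBy before x (y :: ys)
      = if before x y then x :: y :: ys else y :: PySem.List.insertBy before x ys := by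
  simp [PySem.List.insertBy]

theorem pvInsertBy_append_left {α : Type} (before : α → α → Bool) (x : α) (A B : List α)
    (h : ∀ b ∈ B, before x b = true) :
    PySem.List.insertBy before x (A ++ B) = PySem.List.insertBy before x A ++ B := by
  induction A with
  | nil =>
    cases B with
    | nil => simp [pvInsertBy_nil]
    | cons y ys => simp [pvInsertBy_nil, pvInsertBy_cons, h y (by simp)]
  | cons a A ih =>
    simp only [List.cons_append, pvInsertBy_cons]
    by_cases hb : before x a = true
    · simp [hb]
    · simp only [Bool.not_eq_true] at hb
      simp [hb, ih]

theorem pvInsertBy_append_right {α : Type} (before : α → α → Bool) (x : α) (A B : List α)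
    (h : ∀ a ∈ A, before x a = false) :
    PySem.List.insertBy before x (A ++ B) = A ++ PySem.List.insertBy before x B := by
  induction A with
  | nil => simp
  | cons a A ih =>
    simp only [List.cons_append, pvInsertBy_cons, h a (by simp)]
    simp only [Bool.false_eq_true, if_false]
    rw [ih (fun a ha => h a (by simp [ha]))]

-- a stable insertion sort splits along a priority predicate p (low group entirely before high group)
theorem pvFoldl_insertBy_split {α : Type} (before : α → α → Bool) (p R : α → Bool)
    (h : ∀ x y, R x = true → R y = true → p x = true → p y = false →
      before x y = true ∧ before y x = false) :
    ∀ (xs A B : List α), (∀ x ∈ xs, R x = true) → (∀ a ∈ A, R a = true ∧ p a = true) →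
      (∀ b ∈ B, R b = true ∧ p b = false) →
      xs.foldl (fun acc x => PySem.List.insertBy before x acc) (A ++ B)
        = (xs.filter p).foldl (fun acc x => PySem.List.insertBy before x acc) A
          ++ (xs.filter (fun x => !p x)).foldl (fun acc x => PySem.List.insertBy before x acc) B := by
  intro xs
  induction xs with
  | nil => intro A B _ _ _; simp
  | cons x xs ih =>
    intro A B hxs hA hB
    have hRx : R x = true := hxs x (by simp)
    by_cases hp : p x = true
    · have hstep : PySem.List.insertBy before x (A ++ B) = PySem.List.insertBy before x A ++ B :=
        pvInsertBy_append_left before x A B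
          (fun b hb => (h x b hRx (hB b hb).1 hp (hB b hb).2).1)
      simp only [List.foldl_cons, hstep, List.filter_cons, hp, if_pos]
      rw [ih (PySem.List.insertBy before x A) B (fun y hy => hxs y (by simp [hy]))
        (fun a ha => by
          rcases (PySem.List.mem_insertBy before x a A).mp ha with rfl | ha
          · exact ⟨hRx, hp⟩
          · exact hA a ha)
        hB]
      simp
    · simp only [Bool.not_eq_true] at hp
      have hstep : PySem.List.insertBy before x (A ++ B) = A ++ PySem.List.insertBy before x B :=
        pvInsertBy_append_right before x A B
          (fun a ha => (h a x (hA a ha).1 hRx (hA a ha).2 hp).2)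
      simp only [List.foldl_cons, hstep, List.filter_cons, hp]
      rw [ih A (PySem.List.insertBy before x B) (fun y hy => hxs y (by simp [hy])) hA
        (fun b hb => by
          rcases (PySem.List.mem_insertBy before x b B).mp hb with rfl | hb
          · exact ⟨hRx, hp⟩
          · exact hB b hb)]
      simp

theorem pvInsertBy_congr {α : Type} (before before' : α → α → Bool) (x : α) (ys : List α)
    (h : ∀ y ∈ ys, before x y = before' x y) :
    PySem.List.insertBy before x ys = PySem.List.insertBy before' x ys := by
  induction ys with
  | nil => simp [pvInsertBy_nil]
  | cons y ys ih =>
    simp only [pvInsertBy_cons, h y (by simp)]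
    rw [ih (fun y hy => h y (by simp [hy]))]

theorem pvFoldl_insertBy_congr {α : Type} (before before' : α → α → Bool) (R : α → Bool)
    (h : ∀ x y, R x = true → R y = true → before x y = before' x y) :
    ∀ (xs A : List α), (∀ x ∈ xs, R x = true) → (∀ a ∈ A, R a = true) →
      xs.foldl (fun acc x => PySem.List.insertBy before x acc) A
        = xs.foldl (fun acc x => PySem.List.insertBy before' x acc) A := by
  intro xs
  induction xs with
  | nil => intro A _ _; simp
  | cons x xs ih =>
    intro A hxs hA
    have hRx : R x = true := hxs x (by simp)
    simp only [List.foldl_cons]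
    rw [pvInsertBy_congr before before' x A (fun y hy => h x y hRx (hA y hy))]
    exact ih _ (fun y hy => hxs y (by simp [hy]))
      (fun a ha => by
        rcases (PySem.List.mem_insertBy before' x a A).mp ha with rfl | ha
        · exact hRx
        · exact hA a ha)


-- B's classification pass computes A's partition, with A's data list split by tier
theorem pvPartition (ep : String) :
    ∀ (cols : List (String × String)) (pk fk dc : List (String × String)),
      cols.foldl (pvBStep ep) (pk, fk, dc.filter pvQ0, dc.filter pvQ1, dc.filter pvQ2, dc.filter pvQ3)
        = ((cols.foldl (pvAStep ep) (pk, fk, dc)).1,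
           (cols.foldl (pvAStep ep) (pk, fk, dc)).2.1,
           (cols.foldl (pvAStep ep) (pk, fk, dc)).2.2.filter pvQ0,
           (cols.foldl (pvAStep ep) (pk, fk, dc)).2.2.filter pvQ1,
           (cols.foldl (pvAStep ep) (pk, fk, dc)).2.2.filter pvQ2,
           (cols.foldl (pvAStep ep) (pk, fk, dc)).2.2.filter pvQ3) := by
  intro cols
  induction cols with
  | nil => intro pk fk dc; simp
  | cons c cols ih =>
    intro pk fk dc
    simp only [List.foldl_cons]
    by_cases h1 : (PySem.Str.lower c.1 == ep || (PySem.Str.lower c.1 == "id" && pk.isEmpty)) = true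
    · have ha : pvAStep ep (pk, fk, dc) c = (pk ++ [c], fk, dc) := by
        simp only [pvAStep, h1, if_pos]
      have hb : pvBStep ep (pk, fk, dc.filter pvQ0, dc.filter pvQ1, dc.filter pvQ2, dc.filter pvQ3) c
          = (pk ++ [c], fk, dc.filter pvQ0, dc.filter pvQ1, dc.filter pvQ2, dc.filter pvQ3) := by
        simp only [pvBStep, h1, if_pos]
      rw [ha, hb, ih]
    · simp only [Bool.or_eq_true, Bool.and_eq_true, not_or, not_and, Bool.not_eq_true] at h1
      have hne : (PySem.Str.lower c.1 == ep) = false := h1.1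
      have hbne : (PySem.Str.lower c.1 != ep) = true := by simp [bne, hne]
      have h1' : (PySem.Str.lower c.1 == ep || (PySem.Str.lower c.1 == "id" && pk.isEmpty)) = false := by
        rcases h1 with ⟨e1, e2⟩
        cases hid : (PySem.Str.lower c.1 == "id")
        · simp [e1]
        · simp [e1, e2 hid]
      by_cases h2 : PySem.Str.endswith (PySem.Str.lower c.1) "_id" = true
      · have ha : pvAStep ep (pk, fk, dc) c = (pk, fk ++ [c], dc) := by
          simp only [pvAStep, h1', Bool.false_eq_true, if_false, h2, hbne, Bool.and_self, if_pos]
        have hb : pvBStep ep (pk, fk, dc.filter pvQ0, dc.filter pvQ1, dc.filter pvQ2, dc.filter pvQ3) c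
            = (pk, fk ++ [c], dc.filter pvQ0, dc.filter pvQ1, dc.filter pvQ2, dc.filter pvQ3) := by
          simp only [pvBStep, h1', Bool.false_eq_true, if_false, h2, if_pos]
        rw [ha, hb, ih]
      · simp only [Bool.not_eq_true] at h2
        have ha : pvAStep ep (pk, fk, dc) c = (pk, fk, dc ++ [c]) := by
          simp only [pvAStep, h1', Bool.false_eq_true, if_false, h2, Bool.false_and, if_false]
        have hb : pvBStep ep (pk, fk, dc.filter pvQ0, dc.filter pvQ1, dc.filter pvQ2, dc.filter pvQ3) c
            = (pk, fk, (dc ++ [c]).filter pvQ0, (dc ++ [c]).filter pvQ1,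
               (dc ++ [c]).filter pvQ2, (dc ++ [c]).filter pvQ3) := by
          simp only [pvBStep, h1', Bool.false_eq_true, if_false, h2]
          have e0 : (pvBNamePatterns.any fun p => PySem.Str.isIn p (PySem.Str.lower c.1)) = pvD0 c := rfl
          have e1 : (pvBDatePatterns.any fun p => PySem.Str.isIn p (PySem.Str.lower c.1)) = pvD1 c := rfl
          have e2 : pvBCommonPatterns.contains (PySem.Str.lower c.1) = pvD2 c := rfl
          rw [e0, e1, e2]
          cases hd0 : pvD0 c <;> cases hd1 : pvD1 c <;> cases hd2 : pvD2 c <;>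
            simp [List.filter_append, pvQ0, pvQ1, pvQ2, pvQ3, hd0, hd1, hd2]
        rw [ha, hb, ih]

-- ordering facts about the lexicographic key
theorem pvQ0_pri (c : String × String) (h : pvQ0 c = true) : pvPri c = 0 := by
  simp only [pvQ0] at h; simp [pvPri, h]

theorem pvQ1_pri (c : String × String) (h : pvQ1 c = true) : pvPri c = 1 := by
  simp only [pvQ1, Bool.and_eq_true, Bool.not_eq_true'] at h; simp [pvPri, h.1, h.2]

theorem pvQ2_pri (c : String × String) (h : pvQ2 c = true) : pvPri c = 2 := by
  simp only [pvQ2, Bool.and_eq_true, Bool.not_eq_true'] at h; simp [pvPri, h.1.1, h.1.2, h.2]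

theorem pvQ3_pri (c : String × String) (h : pvQ3 c = true) : pvPri c = 3 := by
  simp only [pvQ3, Bool.and_eq_true, Bool.not_eq_true'] at h; simp [pvPri, h.1.1, h.1.2, h.2]

theorem pvBefore3_of_pri_lt (nnc : Option (List (String × Int))) (x y : String × String)
    (h : pvPri x < pvPri y) :
    (pvKeyLt (pvAKey nnc x) (pvAKey nnc y) = true) ∧ (pvKeyLt (pvAKey nnc y) (pvAKey nnc x) = false) := by
  rw [pvAKey_eq, pvAKey_eq]
  unfold pvKeyLt
  constructor
  · simp [h]
  · have h1 : ¬ pvPri y < pvPri x := by omega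
    have h2 : (pvPri y == pvPri x) = false := by simp; omega
    simp [h1, h2]

theorem pvBefore3_eq_before2 (nnc : Option (List (String × Int))) (x y : String × String)
    (h : pvPri x = pvPri y) :
    pvKeyLt (pvAKey nnc x) (pvAKey nnc y)
      = (decide (pvBNn nnc x < pvBNn nnc y)
          || (!decide (pvBNn nnc y < pvBNn nnc x) && decide (pvBLow x < pvBLow y))) := by
  rw [pvAKey_eq, pvAKey_eq]
  unfold pvKeyLt
  by_cases h1 : pvBNn nnc x < pvBNn nnc y
  · simp [h, h1]
  · by_cases h2 : pvBNn nnc y < pvBNn nnc x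
    · have hne : (pvBNn nnc x == pvBNn nnc y) = false := by simp; omega
      simp [h, h1, h2, hne]
    · have heq : pvBNn nnc x = pvBNn nnc y := by omega
      simp [h, heq]

-- one tier: the 3-key insertion sort of a tier is its 2-key sort
theorem pvTierSort (nnc : Option (List (String × Int))) (q : (String × String) → Bool)
    (i : Int) (hq : ∀ c, q c = true → pvPri c = i) (dc : List (String × String)) :
    (dc.filter q).foldl
        (fun acc x => PySem.List.insertBy (fun a b => pvKeyLt (pvAKey nnc a) (pvAKey nnc b)) x acc) []
      = PySem.List.sorted2 (dc.filter q) (pvBNn nnc) pvBLow := by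
  have hs2 : PySem.List.sorted2 (dc.filter q) (pvBNn nnc) pvBLow
      = (dc.filter q).foldl
          (fun acc x => PySem.List.insertBy
            (fun a b => decide (pvBNn nnc a < pvBNn nnc b)
              || (!decide (pvBNn nnc b < pvBNn nnc a) && decide (pvBLow a < pvBLow b))) x acc) [] := by
    rfl
  rw [hs2]
  exact pvFoldl_insertBy_congr _ _ q
    (fun x y hx hy => pvBefore3_eq_before2 nnc x y (by rw [hq x hx, hq y hy]))
    (dc.filter q) [] (fun x hx => (List.mem_filter.mp hx).2) (by simp)

-- the full sort splits into the four tier sorts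
theorem pvSortSplit (nnc : Option (List (String × Int))) (dc : List (String × String)) :
    dc.foldl (fun acc x => PySem.List.insertBy
        (fun a b => pvKeyLt (pvAKey nnc a) (pvAKey nnc b)) x acc) []
      = PySem.List.sorted2 (dc.filter pvQ0) (pvBNn nnc) pvBLow
        ++ (PySem.List.sorted2 (dc.filter pvQ1) (pvBNn nnc) pvBLow
        ++ (PySem.List.sorted2 (dc.filter pvQ2) (pvBNn nnc) pvBLow
        ++ PySem.List.sorted2 (dc.filter pvQ3) (pvBNn nnc) pvBLow)) := by
  -- split off tier 0
  have hsplit0 := pvFoldl_insertBy_split (fun a b => pvKeyLt (pvAKey nnc a) (pvAKey nnc b)) pvQ0 (fun _ => true)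
    (fun x y _ _ hx hy => pvBefore3_of_pri_lt nnc x y (by
      have h0 : pvPri x = 0 := pvQ0_pri x hx
      have : 1 ≤ pvPri y := by
        simp only [pvQ0] at hy
        simp only [pvPri, hy, Bool.false_eq_true, if_false]
        split <;> (try split) <;> omega
      omega))
    dc [] [] (by simp) (by simp) (by simp)
  simp only [List.nil_append] at hsplit0
  -- split off tier 1 from the rest
  have hsplit1 := pvFoldl_insertBy_split (fun a b => pvKeyLt (pvAKey nnc a) (pvAKey nnc b)) pvD1 (fun c => !pvD0 c)
    (fun x y hx hy hx1 hy1 => pvBefore3_of_pri_lt nnc x y (by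
      simp only [Bool.not_eq_true'] at hx hy
      simp only [pvPri, hx, hy, hx1, hy1, Bool.false_eq_true, if_false, if_pos]
      split <;> omega))
    (dc.filter (fun x => !pvQ0 x)) [] []
    (fun x hx => by simpa [pvQ0] using (List.mem_filter.mp hx).2) (by simp) (by simp)
  simp only [List.nil_append] at hsplit1
  -- split off tier 2 from the remainder
  have hsplit2 := pvFoldl_insertBy_split (fun a b => pvKeyLt (pvAKey nnc a) (pvAKey nnc b)) pvD2 (fun c => !pvD0 c && !pvD1 c)
    (fun x y hx hy hx2 hy2 => pvBefore3_of_pri_lt nnc x y (by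
      simp only [Bool.and_eq_true, Bool.not_eq_true'] at hx hy
      simp only [pvPri, hx.1, hx.2, hy.1, hy.2, hx2, hy2, Bool.false_eq_true, if_false, if_pos]
      omega))
    ((dc.filter (fun x => !pvQ0 x)).filter (fun x => !pvD1 x)) [] []
    (fun x hx => by
      have h1 := (List.mem_filter.mp hx).2
      have h0 := (List.mem_filter.mp (List.mem_filter.mp hx).1).2
      simp only [pvQ0] at h0
      simp [h0, h1]) (by simp) (by simp)
  simp only [List.nil_append] at hsplit2
  -- identify the filtered lists with the tier predicates
  have hf1 : (dc.filter (fun x => !pvQ0 x)).filter pvD1 = dc.filter pvQ1 := by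
    rw [List.filter_filter]; exact List.filter_congr (fun a _ => by simp [pvQ0, pvQ1, Bool.and_comm])
  have hf2 : ((dc.filter (fun x => !pvQ0 x)).filter (fun x => !pvD1 x)).filter pvD2
      = dc.filter pvQ2 := by
    rw [List.filter_filter, List.filter_filter]
    exact List.filter_congr (fun a _ => by
      simp only [pvQ0, pvQ2]
      cases hx0 : pvD0 a <;> cases hx1 : pvD1 a <;> cases hx2 : pvD2 a <;> simp)
  have hf3 : ((dc.filter (fun x => !pvQ0 x)).filter (fun x => !pvD1 x)).filter (fun x => !pvD2 x)
      = dc.filter pvQ3 := by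
    rw [List.filter_filter, List.filter_filter]
    exact List.filter_congr (fun a _ => by
      simp only [pvQ0, pvQ3]
      cases hx0 : pvD0 a <;> cases hx1 : pvD1 a <;> cases hx2 : pvD2 a <;> simp)
  rw [hsplit0, hsplit1, hsplit2, hf1, hf2, hf3]
  rw [pvTierSort nnc pvQ0 0 pvQ0_pri, pvTierSort nnc pvQ1 1 pvQ1_pri,
    pvTierSort nnc pvQ2 2 pvQ2_pri, pvTierSort nnc pvQ3 3 pvQ3_pri]

theorem prioritize_columns_eq (columns : List (String × String)) (table_name : String)
    (max_columns : Int) (non_null_counts : Option (List (String × Int))) :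
    prioritize_columns columns table_name max_columns non_null_counts =
    prioritize_columns_alt columns table_name max_columns non_null_counts := by
  simp only [prioritize_columns, prioritize_columns_alt]
  have hpart := pvPartition (table_name ++ "_id") columns [] [] []
  simp only [List.filter_nil] at hpart
  rw [hpart]
  have hsort := pvSortSplit non_null_counts
      ((columns.foldl (pvAStep (table_name ++ "_id")) ([], [], [])).2.2)
  simp only [← List.append_assoc] at hsort ⊢
  rw [← hsort]

-- ===== VERDICT (by name: the statement is the Claim_ definition above) =====
theorem prioritize_columns_spec : Claim_equal_prioritize_columns := by
  intro columns table_name max_columns non_null_counts _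
  unfold Spec_prioritize_columns
  exact prioritize_columns_eq columns table_name max_columns non_null_counts
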